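-- pv_equiv track=rewrite | github.com/jbaldivieso/adventofcode | 2020/11.py | apply_new_rules
-- ===== SOURCE A (Python) =====
-- from copy import deepcopy
--
-- def apply_new_rules(config):
--     new_config = deepcopy(config)
--
--     def get_adjacent_count(x, y):
--         """Return the number of *occupied* adjacent seats, based on sightline.
--         """
--         def occupied_in_sight(x, y, dx, dy):
--             if (y + dy < 0) or (x + dx < 0):
--                 return False
--             try:
--                 if config[y + dy][x + dx] == "#":
--                     return True
--                 if config[y + dy][x + dx] == ".":
--                     return occupied_in_sight(x + dx, y + dy, dx, dy)
--             except IndexError: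
--                 return False
--
--         count = 0
--         deltas = [
--             (-1, -1), (0, -1), (1, -1),
--             (-1, 0),           (1, 0),
--             (-1, 1),  (0, 1),  (1, 1),
--             ]
--         for dx, dy in deltas:
--             if occupied_in_sight(x, y, dx, dy):
--                 count += 1
--         return count
--
--     def update_seat(x, y):
--         """Seat filling rules:
--         1. If a seat is empty (L) and there are no occupied seats adjacent to
--         it, the seat becomes occupied.
--         2. If a seat is occupied (#) and five or more seats adjacent to it are
--         also occupied, the seat becomes empty.
--         3. Otherwise, the seat's state does not change.
--         """
--         status = new_config[y][x]
--         if status == "L":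
--             if get_adjacent_count(x, y) == 0:
--                 new_config[y][x] = "#"
--         elif status == "#":
--             if get_adjacent_count(x, y) >= 5:
--                 new_config[y][x] = "L"
--
--     for y in range(len(new_config)):
--         for x in range(len(new_config[y])):
--             update_seat(x, y)
--     return new_config
-- ===== SOURCE B (Python) =====
-- def apply_new_rules(config):
--     """Same one step of the sightline seat automaton, but via eight linear
--     sweeps that propagate visibility per direction (O(R*C) total)."""
--     deltas = [
--         (-1, -1), (0, -1), (1, -1),
--         (-1, 0),           (1, 0),
--         (-1, 1),  (0, 1),  (1, 1),
--         ]
--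
--     def from_prev(dx, prev_row, prev_vis, x):
--         # visibility of an occupied seat from (x, .) looking one row over
--         if prev_row is None:
--             return False
--         nx = x + dx
--         if nx < 0 or nx >= len(prev_row):
--             return False
--         c = prev_row[nx]
--         if c == "#":
--             return True
--         if c == ".":
--             return prev_vis[nx]
--         return False
--
--     def scan_row(row):
--         # dx == -1, dy == 0: left-to-right scan carrying the previous cell
--         out = []
--         prev_c, prev_v = None, False
--         for c in row:
--             v = prev_c == "#" or (prev_c == "." and prev_v)
--             out.append(v)
--             prev_c, prev_v = c, v
--         return out
--
--     def sweep(dx, dy):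
--         if dy == 0:
--             if dx == -1:
--                 return [scan_row(row) for row in config]
--             return [list(reversed(scan_row(list(reversed(row))))) for row in config]
--         rows = config if dy == -1 else list(reversed(config))
--         out = []
--         prev_row, prev_vis = None, []
--         for row in rows:
--             cur = [from_prev(dx, prev_row, prev_vis, x) for x in range(len(row))]
--             out.append(cur)
--             prev_row, prev_vis = row, cur
--         if dy == 1:
--             out.reverse()
--         return out
--
--     grids = [sweep(dx, dy) for dx, dy in deltas]
--
--     result = []
--     for y, row in enumerate(config):
--         new_row = []
--         for x, c in enumerate(row):
--             n = sum(g[y][x] for g in grids)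
--             if c == "L" and n == 0:
--                 new_row.append("#")
--             elif c == "#" and n >= 5:
--                 new_row.append("L")
--             else:
--                 new_row.append(c)
--         result.append(new_row)
--     return result
-- ===== Notes on version B (the rewrite author's own statement) =====
-- stated objective: alternative
-- what changed: A casts a recursive sight-line ray from each seat in each of the 8 directions; B instead precomputes, for every cell and direction, whether an occupied seat is visible, via eight whole-grid linear sweeps that propagate visibility from the previous row/cell, then applies the seating rules in one pass.
import Mathlib
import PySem

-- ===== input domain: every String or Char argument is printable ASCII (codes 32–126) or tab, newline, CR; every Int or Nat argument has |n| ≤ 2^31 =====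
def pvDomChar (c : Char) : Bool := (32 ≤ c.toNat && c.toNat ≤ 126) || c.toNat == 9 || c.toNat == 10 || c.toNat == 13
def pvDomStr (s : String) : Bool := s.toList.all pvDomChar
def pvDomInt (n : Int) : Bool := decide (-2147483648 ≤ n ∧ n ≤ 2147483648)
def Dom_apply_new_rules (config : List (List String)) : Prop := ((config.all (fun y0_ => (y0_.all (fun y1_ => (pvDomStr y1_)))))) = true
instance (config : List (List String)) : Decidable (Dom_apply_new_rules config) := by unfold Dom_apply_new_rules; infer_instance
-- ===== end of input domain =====

-- B replaces A's per-seat recursive ray casting by eight whole-grid directional sweeps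
-- that propagate visibility line by line (objective: alternative algorithm, similar cost).

-- ===== PORT A =====
-- the 8 sight directions, in A's order
def pvDeltas : List (Int × Int) :=
  [(-1, -1), (0, -1), (1, -1), (-1, 0), (1, 0), (-1, 1), (0, 1), (1, 1)]

-- occupied_in_sight: recursion on `fuel` is only a totality guard; pvFuel below always
-- suffices, since each step moves one row (dy ≠ 0) or one column (dy = 0, dx ≠ 0)
-- towards an edge, where the guard / IndexError (pyGet? = none) stops the walk.
def occInSight (config : List (List String)) (dx dy : Int) : Nat → Int → Int → Bool
  | 0, _, _ => false
  | fuel + 1, x, y =>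
    if y + dy < 0 ∨ x + dx < 0 then false
    else
      match PySem.List.pyGet? config (y + dy) with
      | none => false
      | some row =>
        match PySem.List.pyGet? row (x + dx) with
        | none => false
        | some c =>
          if c = "#" then true
          else if c = "." then occInSight config dx dy fuel (x + dx) (y + dy)
          else false

def pvFuel (config : List (List String)) : Nat :=
  config.length + config.foldl (fun acc row => max acc row.length) 0 + 2

-- get_adjacent_count
def adjCount (config : List (List String)) (x y : Int) : Nat :=
  pvDeltas.foldl
    (fun cnt d => if occInSight config d.1 d.2 (pvFuel config) x y then cnt + 1 else cnt) 0

-- update_seat (reads status from the grid being updated, like the Python)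
def updateSeat (config : List (List String)) (nc : List (List String)) (x y : Nat) :
    List (List String) :=
  let status := (nc.getD y []).getD x ""
  if status = "L" then
    if adjCount config ↑x ↑y = 0 then nc.set y ((nc.getD y []).set x "#") else nc
  else if status = "#" then
    if 5 ≤ adjCount config ↑x ↑y then nc.set y ((nc.getD y []).set x "L") else nc
  else nc

def apply_new_rules (config : List (List String)) : List (List String) :=
  (List.range config.length).foldl
    (fun nc y =>
      (List.range ((nc.getD y []).length)).foldl (fun nc2 x => updateSeat config nc2 x y) nc)
    config

-- ===== PORT B =====
-- from_prev: visibility of an occupied seat one line over, in direction dx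
def fromPrev (dx : Int) (prevRow : Option (List String)) (prevVis : List Bool) (x : Int) : Bool :=
  match prevRow with
  | none => false
  | some pr =>
    let nx := x + dx
    if nx < 0 ∨ (pr.length : Int) ≤ nx then false
    else
      match PySem.List.pyGet? pr nx with
      | none => false
      | some c =>
        if c = "#" then true
        else if c = "." then prevVis.getD nx.toNat false
        else false

-- scan_row (dx = -1, dy = 0): left-to-right scan carrying the previous cell
def scanRowAux (prevC : Option String) (prevV : Bool) : List String → List Bool
  | [] => []
  | c :: rest =>
    let v := prevC == some "#" || (prevC == some "." && prevV)
    v :: scanRowAux (some c) v rest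

-- the row loop of sweep for dy ≠ 0, carrying the previous row and its visibility
def sweepVAux (dx : Int) (prevRow : Option (List String)) (prevVis : List Bool) :
    List (List String) → List (List Bool)
  | [] => []
  | row :: rest =>
    let cur := (List.range row.length).map (fun x : Nat => fromPrev dx prevRow prevVis ↑x)
    cur :: sweepVAux dx (some row) cur rest

def sweep (config : List (List String)) (dx dy : Int) : List (List Bool) :=
  if dy = 0 then
    if dx = -1 then config.map (fun row => scanRowAux none false row)
    else config.map (fun row => (scanRowAux none false row.reverse).reverse)
  else
    let rows := if dy = -1 then config else config.reverse
    let out := sweepVAux dx none [] rows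
    if dy = 1 then out.reverse else out

-- n = sum(g[y][x] for g in grids)
def countAt (grids : List (List (List Bool))) (y x : Nat) : Nat :=
  grids.foldl (fun s g => s + (if (g.getD y []).getD x false then 1 else 0)) 0

def newCell (grids : List (List (List Bool))) (y x : Nat) (c : String) : String :=
  let n := countAt grids y x
  if c = "L" ∧ n = 0 then "#"
  else if c = "#" ∧ 5 ≤ n then "L"
  else c

def apply_new_rules_alt (config : List (List String)) : List (List String) :=
  let grids := pvDeltas.map (fun d => sweep config d.1 d.2)
  config.mapIdx (fun y row => row.mapIdx (fun x c => newCell grids y x c))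

-- ===== PRECONDITION & SPEC =====
def Spec_apply_new_rules (config : List (List String)) (out : List (List String)) : Prop := out = apply_new_rules_alt config
instance (config : List (List String)) (out : List (List String)) : Decidable (Spec_apply_new_rules config out) := by unfold Spec_apply_new_rules; infer_instance

-- ===== CLAIM (what is proved, stated in full; the proofs are below) =====
def Claim_equal_apply_new_rules : Prop := ∀ (config : List (List String)), Dom_apply_new_rules config → Spec_apply_new_rules config (apply_new_rules config)

-- ===== LEMMAS AND PROOFS =====

-- the common cell-level description both programs are reduced to
def ruleCell (config : List (List String)) (x y : Nat) (c : String) : String :=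
  if c = "L" then (if adjCount config ↑x ↑y = 0 then "#" else c)
  else if c = "#" then (if 5 ≤ adjCount config ↑x ↑y then "L" else c)
  else c

def specGrid (config : List (List String)) : List (List String) :=
  config.mapIdx (fun y row => row.mapIdx (fun x c => ruleCell config x y c))

-- ---- A = specGrid ----

-- the row-local version of the inner x-loop
def updRow (config : List (List String)) (r : List String) (x y : Nat) : List String :=
  let status := r.getD x ""
  if status = "L" then
    if adjCount config ↑x ↑y = 0 then r.set x "#" else r
  else if status = "#" then
    if 5 ≤ adjCount config ↑x ↑y then r.set x "L" else r
  else r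

def rowFold (config : List (List String)) (row : List String) (n y : Nat) : List String :=
  (List.range n).foldl (fun r x => updRow config r x y) row

theorem length_updRow (config : List (List String)) (r : List String) (x y : Nat) :
    (updRow config r x y).length = r.length := by
  simp only [updRow]
  split_ifs <;> simp

theorem length_rowFold (config : List (List String)) (row : List String) (n y : Nat) :
    (rowFold config row n y).length = row.length := by
  induction n with
  | zero => simp [rowFold]
  | succ n ih =>
    unfold rowFold at *
    rw [List.range_succ, List.foldl_append]
    simp [length_updRow, ih]

theorem getD_updRow (config : List (List String)) (r : List String) (x0 y x : Nat) :
    (updRow config r x0 y).getD x "" =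
      if x = x0 then ruleCell config x0 y (r.getD x0 "") else r.getD x "" := by
  have hset : ∀ (v : String), (r.set x0 v).getD x "" =
      if x = x0 then (if x0 < r.length then v else "") else r.getD x "" := by
    intro v
    simp only [List.getD_eq_getElem?_getD, List.getElem?_set]
    by_cases h : x = x0
    · subst h; by_cases h' : x < r.length <;> simp [h']
    · simp [h, Ne.symm h]
  have hoob : ¬ x0 < r.length → r.getD x0 "" = "" := by
    intro h
    have : r[x0]? = none := List.getElem?_eq_none (by omega)
    simp [List.getD_eq_getElem?_getD, this]
  simp only [updRow, ruleCell]
  by_cases hin : x0 < r.length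
  · split_ifs <;> simp_all [hset]
  · have := hoob hin
    split_ifs <;> simp_all [hset]

theorem getD_rowFold (config : List (List String)) (row : List String) (n y x : Nat) :
    (rowFold config row n y).getD x "" =
      if x < n then ruleCell config x y (row.getD x "") else row.getD x "" := by
  induction n generalizing x with
  | zero => simp [rowFold]
  | succ n ih =>
    unfold rowFold at *
    rw [List.range_succ, List.foldl_append]
    simp only [List.foldl_cons, List.foldl_nil]
    rw [getD_updRow]
    have hn : ((List.range n).foldl (fun r x => updRow config r x y) row)[n]?.getD "" =
        row[n]?.getD "" := by
      have := ih n
      simp only [List.getD_eq_getElem?_getD] at this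
      simpa using this
    by_cases h : x = n
    · subst h; simp [hn]
    · rw [if_neg h, ih]
      by_cases h' : x < n
      · simp [h', Nat.lt_succ_of_lt h']
      · have : ¬ x < n + 1 := by omega
        simp [h', this]

theorem rowFold_eq_mapIdx (config : List (List String)) (row : List String) (y : Nat) :
    rowFold config row row.length y = row.mapIdx (fun x c => ruleCell config x y c) := by
  apply List.ext_getElem
  · simp [length_rowFold]
  · intro i h1 h2
    have h : i < row.length := by simpa [length_rowFold] using h1
    have := getD_rowFold config row row.length y i
    rw [if_pos h] at this
    simpa [List.getD_eq_getElem?_getD, List.getElem?_eq_getElem, h,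
      length_rowFold, List.getElem_mapIdx] using this

theorem updateSeat_set (config : List (List String)) (nc : List (List String))
    (r : List String) (x y : Nat) (hy : y < nc.length) :
    updateSeat config (nc.set y r) x y = nc.set y (updRow config r x y) := by
  have hget : (nc.set y r).getD y [] = r := by
    simp [List.getD_eq_getElem?_getD, List.getElem?_set, hy]
  simp only [updateSeat, updRow, hget]
  split_ifs <;> simp [List.set_set]

theorem innerFold_eq (config : List (List String)) (nc : List (List String)) (n y : Nat)
    (hy : y < nc.length) :
    (List.range n).foldl (fun nc2 x => updateSeat config nc2 x y) nc =
      nc.set y (rowFold config (nc.getD y []) n y) := by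
  induction n with
  | zero =>
    simp only [rowFold, List.range_zero, List.foldl_nil]
    rw [List.getD_eq_getElem nc [] hy, List.set_getElem_self]
  | succ n ih =>
    unfold rowFold at *
    rw [List.range_succ, List.foldl_append, List.foldl_append]
    simp only [List.foldl_cons, List.foldl_nil]
    rw [ih, updateSeat_set config nc _ n y hy]

theorem outer_inv (config : List (List String)) (n : Nat) (hn : n ≤ config.length) :
    (List.range n).foldl
        (fun nc y =>
          (List.range ((nc.getD y []).length)).foldl (fun nc2 x => updateSeat config nc2 x y) nc)
        config =
      (config.take n).mapIdx (fun y row => row.mapIdx (fun x c => ruleCell config x y c)) ++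
        config.drop n := by
  induction n with
  | zero => simp
  | succ n ih =>
    have hlt : n < config.length := by omega
    rw [List.range_succ, List.foldl_append]
    simp only [List.foldl_cons, List.foldl_nil]
    rw [ih (by omega)]
    set prefix_ := (config.take n).mapIdx
      (fun y row => row.mapIdx (fun x c => ruleCell config x y c)) with hpre
    have hplen : prefix_.length = n := by
      simp [hpre, List.length_mapIdx, List.length_take, Nat.min_eq_left (le_of_lt hlt)]
    have hdrop : config.drop n = config[n] :: config.drop (n + 1) :=
      List.drop_eq_getElem_cons hlt
    have hget : (prefix_ ++ config.drop n).getD n [] = config[n] := by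
      rw [List.getD_append_right _ _ _ _ (by omega), hplen, Nat.sub_self, hdrop]
      rfl
    have hlen : (prefix_ ++ config.drop n).length = config.length := by
      simp [hplen, List.length_drop]; omega
    rw [innerFold_eq config _ _ n (by rw [hlen]; exact hlt), hget,
      rowFold_eq_mapIdx]
    rw [List.take_succ_eq_append_getElem hlt, List.mapIdx_append]
    have hset : ∀ (v : List String),
        (prefix_ ++ config.drop n).set n v = prefix_ ++ v :: config.drop (n + 1) := by
      intro v
      rw [List.set_append, if_neg (by omega), hplen, Nat.sub_self, hdrop]
      rfl
    rw [hset]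
    simp only [List.length_take, Nat.min_eq_left (le_of_lt hlt), List.mapIdx_cons,
      List.mapIdx_nil, Nat.zero_add, List.append_assoc, List.singleton_append]
    exact hpre ▸ rfl

theorem a_eq_spec (config : List (List String)) : apply_new_rules config = specGrid config := by
  unfold apply_new_rules specGrid
  rw [outer_inv config config.length le_rfl]
  simp

-- ---- B = specGrid ----

theorem length_sweepVAux (dx : Int) (prevRow : Option (List String)) (prevVis : List Bool)
    (rest : List (List String)) : (sweepVAux dx prevRow prevVis rest).length = rest.length := by
  induction rest generalizing prevRow prevVis with
  | nil => rfl
  | cons row rest ih => simp [sweepVAux, ih]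

theorem length_scanRowAux (prevC : Option String) (prevV : Bool) (l : List String) :
    (scanRowAux prevC prevV l).length = l.length := by
  induction l generalizing prevC prevV with
  | nil => rfl
  | cons c rest ih => simp [scanRowAux, ih]

theorem occ_unfold (cfg : List (List String)) (dx dy : Int) (f : Nat) (x y : Int) :
    occInSight cfg dx dy (f + 1) x y =
      if y + dy < 0 ∨ x + dx < 0 then false
      else
        ((PySem.List.pyGet? cfg (y + dy)).bind
            (fun row => PySem.List.pyGet? row (x + dx))).elim false
          (fun c =>
            if c = "#" then true
            else if c = "." then occInSight cfg dx dy f (x + dx) (y + dy)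
            else false) := by
  cases h1 : PySem.List.pyGet? cfg (y + dy) with
  | none => simp only [occInSight, h1]; split_ifs <;> rfl
  | some row =>
    simp only [occInSight, h1]
    split_ifs
    · rfl
    · cases h2 : PySem.List.pyGet? row (x + dx) <;> simp only [Option.bind_some, h2] <;> rfl

theorem fromPrev_unfold (dx : Int) (prevRow : Option (List String)) (prevVis : List Bool)
    (x : Int) :
    fromPrev dx prevRow prevVis x =
      prevRow.elim false (fun pr =>
        if x + dx < 0 ∨ (pr.length : Int) ≤ x + dx then false
        else
          (PySem.List.pyGet? pr (x + dx)).elim false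
            (fun c =>
              if c = "#" then true
              else if c = "." then prevVis.getD (x + dx).toNat false
              else false)) := by
  cases prevRow with
  | none => rfl
  | some pr =>
    simp only [fromPrev, Option.elim]
    split_ifs
    · rfl
    · cases h2 : PySem.List.pyGet? pr (x + dx) <;> simp only [h2] <;> rfl

theorem sweepV_correct (cfg : List (List String)) (dx : Int) :
    ∀ (rest : List (List String)) (k : Nat) (prevRow : Option (List String)) (prevVis : List Bool),
      rest = cfg.drop k →
      (k = 0 → prevRow = none) →
      (∀ k', k = k' + 1 →
          k' < cfg.length ∧ prevRow = some (cfg.getD k' []) ∧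
          prevVis.length = (cfg.getD k' []).length ∧
          (∀ x fuel, x < (cfg.getD k' []).length → k' + 2 ≤ fuel →
            prevVis.getD x false = occInSight cfg dx (-1) fuel ↑x ↑k')) →
      ∀ j x fuel, j < rest.length → x < (rest.getD j []).length → k + j + 2 ≤ fuel →
        ((sweepVAux dx prevRow prevVis rest).getD j []).getD x false =
          occInSight cfg dx (-1) fuel ↑x ↑(k + j)
  | [], k, prevRow, prevVis => by
    intro _ _ _ j x fuel hj
    simp at hj
  | row :: rest', k, prevRow, prevVis => by
    intro hdrop h0 hS j x fuel hj hx hfuel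
    have hkR : k < cfg.length := by
      by_contra h
      rw [List.drop_eq_nil_iff.mpr (by omega)] at hdrop
      exact absurd hdrop (by simp)
    have hcons := List.drop_eq_getElem_cons hkR
    rw [← hdrop] at hcons
    obtain ⟨hrow, hrest'⟩ : row = cfg[k] ∧ rest' = cfg.drop (k + 1) := by
      constructor <;> [exact (List.cons.injEq _ _ _ _ ▸ hcons).1;
        exact (List.cons.injEq _ _ _ _ ▸ hcons).2]
    have hrowD : row = cfg.getD k [] := by rw [hrow, List.getD_eq_getElem cfg [] hkR]
    -- correctness of the freshly computed row
    have hcur : ∀ x fuel, x < row.length → k + 2 ≤ fuel →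
        ((List.range row.length).map (fun x : Nat => fromPrev dx prevRow prevVis ↑x)).getD
            x false = occInSight cfg dx (-1) fuel ↑x ↑k := by
      intro x fuel hx hf
      obtain ⟨f, rfl⟩ : ∃ f, fuel = f + 1 := ⟨fuel - 1, by omega⟩
      rw [PySem.List.getD_map_range _ _ _ _ hx, occ_unfold, fromPrev_unfold]
      match k, h0, hS with
      | 0, h0, _ =>
        rw [h0 rfl, if_pos (Or.inl (by norm_num))]
        rfl
      | k' + 1, _, hS =>
        obtain ⟨hk'R, hprevRow, hlen, hprop⟩ := hS k' rfl
        rw [hprevRow]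
        simp only [Option.elim]
        have hy : (↑(k' + 1) : Int) + (-1) = ↑k' := by push_cast; ring
        by_cases hneg : (↑x : Int) + dx < 0
        · rw [if_pos (Or.inr hneg), if_pos (Or.inl hneg)]
        · obtain ⟨m, hm⟩ : ∃ m : Nat, (↑x : Int) + dx = ↑m :=
            ⟨((↑x : Int) + dx).toNat, (Int.toNat_of_nonneg (by omega)).symm⟩
          have hgetk : cfg[k']? = some (cfg.getD k' []) := by
            rw [List.getElem?_eq_getElem hk'R, List.getD_eq_getElem cfg [] hk'R]
          rw [if_neg (show ¬((↑(k' + 1) : Int) + (-1) < 0 ∨ (↑x : Int) + dx < 0) from by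
              push_cast; omega),
            hy, hm]
          simp only [PySem.List.pyGet?_natCast]
          rw [hgetk, Option.bind_some]
          by_cases hm2 : m < (cfg.getD k' []).length
          · rw [if_neg (show ¬((↑m : Int) < 0 ∨ ((cfg.getD k' []).length : Int) ≤ ↑m) from by
                push_cast; omega),
              List.getElem?_eq_getElem hm2]
            simp only [Option.elim, Int.toNat_natCast]
            split_ifs with hhash hdot
            · rfl
            · exact hprop m f hm2 (by omega)
            · rfl
          · rw [if_pos (Or.inr (show ((cfg.getD k' []).length : Int) ≤ ↑m from by
                push_cast; omega)),
              List.getElem?_eq_none (by omega)]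
    simp only [sweepVAux]
    match j, hj, hx with
    | 0, _, hx =>
      simp only [List.getD_cons_zero] at hx ⊢
      exact hcur x fuel hx (by omega)
    | j' + 1, hj, hx =>
      simp only [List.getD_cons_succ, List.length_cons] at hj hx ⊢
      have := sweepV_correct cfg dx rest' (k + 1) (some row)
        ((List.range row.length).map (fun x : Nat => fromPrev dx prevRow prevVis ↑x))
        hrest'
        (by omega)
        (by
          intro k'' hk''
          have hkk : k'' = k := by omega
          subst hkk
          refine ⟨hkR, by rw [hrowD],
            by simp only [List.length_map, List.length_range]; rw [hrowD], ?_⟩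
          intro x fuel hx hf
          rw [← hrowD] at hx
          exact hcur x fuel hx hf)
        j' x fuel (by omega) hx (by omega)
      rw [this]
      congr 2
      omega

theorem getD_reverse {α : Type} (l : List α) (i : Nat) (d : α) (h : i < l.length) :
    l.reverse.getD i d = l.getD (l.length - 1 - i) d := by
  simp [List.getD_eq_getElem?_getD, List.getElem?_reverse h]

-- row localization: for dy = 0 the walk never leaves row y
theorem occ_row_local (cfg : List (List String)) (dx : Int) (y : Nat) (hy : y < cfg.length) :
    ∀ (fuel : Nat) (x : Int),
      occInSight cfg dx 0 fuel x ↑y = occInSight [cfg.getD y []] dx 0 fuel x 0 := by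
  intro fuel
  induction fuel with
  | zero => intro x; rfl
  | succ f ih =>
    intro x
    rw [occ_unfold, occ_unfold]
    have h1 : (↑y : Int) + 0 = ↑y := by ring
    have hz : PySem.List.pyGet? [cfg.getD y []] ((0 : Int) + 0) = some (cfg.getD y []) := by
      simp [PySem.List.pyGet?, PySem.List.pyIdx?]
    rw [h1, hz, PySem.List.pyGet?_natCast, List.getElem?_eq_getElem hy,
      show cfg[y] = cfg.getD y [] from (List.getD_eq_getElem cfg [] hy).symm]
    by_cases hneg : x + dx < 0
    · rw [if_pos (Or.inr hneg), if_pos (Or.inr hneg)]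
    · rw [if_neg (by omega), if_neg (by omega)]
      simp only [Option.bind_some]
      cases hc : PySem.List.pyGet? (cfg.getD y []) (x + dx) with
      | none => rfl
      | some c =>
        simp only [Option.elim]
        split_ifs
        · rfl
        · rw [show (0 : Int) + 0 = 0 from by ring, ih (x + dx)]
        · rfl

-- horizontal mirror: looking right in a row = looking left in the reversed row
theorem occ_row_rev (row : List String) :
    ∀ (fuel x : Nat), x < row.length →
      occInSight [row] 1 0 fuel ↑x 0 =
        occInSight [row.reverse] (-1) 0 fuel ↑(row.length - 1 - x) 0 := by
  intro fuel
  induction fuel with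
  | zero => intro x _; rfl
  | succ f ih =>
    intro x hx
    rw [occ_unfold, occ_unfold]
    have hz1 : PySem.List.pyGet? [row] ((0 : Int) + 0) = some row := by
      simp [PySem.List.pyGet?, PySem.List.pyIdx?]
    have hz2 : PySem.List.pyGet? [row.reverse] ((0 : Int) + 0) = some row.reverse := by
      simp [PySem.List.pyGet?, PySem.List.pyIdx?]
    rw [hz1, hz2]
    simp only [Option.bind_some]
    by_cases hlast : x + 1 < row.length
    · rw [if_neg (by omega), if_neg (by omega)]
      have e1 : (↑x : Int) + 1 = ↑(x + 1) := by omega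
      have e2 : (↑(row.length - 1 - x) : Int) + (-1) = ↑(row.length - 1 - (x + 1)) := by omega
      rw [e1, e2, PySem.List.pyGet?_natCast, PySem.List.pyGet?_natCast,
        List.getElem?_reverse (show row.length - 1 - (x + 1) < row.length by omega),
        show row.length - 1 - (row.length - 1 - (x + 1)) = x + 1 from by omega,
        List.getElem?_eq_getElem hlast]
      simp only [Option.elim]
      split_ifs
      · rfl
      · rw [show (0 : Int) + 0 = 0 from by ring, ih (x + 1) hlast]
      · rfl
    · rw [if_pos (Or.inr (show (↑(row.length - 1 - x) : Int) + (-1) < 0 from by omega)),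
        if_neg (show ¬((0 : Int) + 0 < 0 ∨ (↑x : Int) + 1 < 0) from by omega)]
      have e1 : (↑x : Int) + 1 = ↑(x + 1) := by omega
      rw [e1, PySem.List.pyGet?_natCast, List.getElem?_eq_none (by omega)]
      rfl

-- vertical mirror: looking down = looking up in the reversed grid
theorem occ_vert_rev (cfg : List (List String)) (dx : Int) :
    ∀ (fuel : Nat) (y : Nat), y < cfg.length → ∀ (x : Int),
      occInSight cfg dx 1 fuel x ↑y =
        occInSight cfg.reverse dx (-1) fuel x ↑(cfg.length - 1 - y) := by
  intro fuel
  induction fuel with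
  | zero => intro y _ x; rfl
  | succ f ih =>
    intro y hy x
    rw [occ_unfold, occ_unfold]
    by_cases hneg : x + dx < 0
    · rw [if_pos (Or.inr hneg), if_pos (Or.inr hneg)]
    · by_cases hlast : y + 1 < cfg.length
      · rw [if_neg (by omega), if_neg (by omega)]
        have e1 : (↑y : Int) + 1 = ↑(y + 1) := by omega
        have e2 : (↑(cfg.length - 1 - y) : Int) + (-1) = ↑(cfg.length - 1 - (y + 1)) := by
          omega
        rw [e1, e2, PySem.List.pyGet?_natCast, PySem.List.pyGet?_natCast,
          List.getElem?_reverse (show cfg.length - 1 - (y + 1) < cfg.length by omega),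
          show cfg.length - 1 - (cfg.length - 1 - (y + 1)) = y + 1 from by omega,
          List.getElem?_eq_getElem hlast]
        simp only [Option.bind_some]
        cases hc : PySem.List.pyGet? cfg[y + 1] (x + dx) with
        | none => rfl
        | some c =>
          simp only [Option.elim]
          split_ifs
          · rfl
          · exact ih (y + 1) hlast (x + dx)
          · rfl
      · rw [if_pos (Or.inl (show (↑(cfg.length - 1 - y) : Int) + (-1) < 0 from by omega)),
          if_neg (show ¬((↑y : Int) + 1 < 0 ∨ x + dx < 0) from by omega)]
        have e1 : (↑y : Int) + 1 = ↑(y + 1) := by omega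
        rw [e1, PySem.List.pyGet?_natCast, List.getElem?_eq_none (by omega)]
        rfl

theorem scanRow_correct (row : List String) :
    ∀ (rest : List String) (k : Nat) (prevC : Option String) (prevV : Bool),
      rest = row.drop k →
      (k = 0 → prevC = none) →
      (∀ k', k = k' + 1 →
          k' < row.length ∧ prevC = some (row.getD k' "") ∧
          (∀ fuel, k' + 2 ≤ fuel → prevV = occInSight [row] (-1) 0 fuel ↑k' 0)) →
      ∀ j fuel, j < rest.length → k + j + 2 ≤ fuel →
        (scanRowAux prevC prevV rest).getD j false = occInSight [row] (-1) 0 fuel ↑(k + j) 0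
  | [], k, prevC, prevV => by
    intro _ _ _ j fuel hj
    simp at hj
  | c :: rest', k, prevC, prevV => by
    intro hdrop h0 hS j fuel hj hfuel
    have hkR : k < row.length := by
      by_contra h
      rw [List.drop_eq_nil_iff.mpr (by omega)] at hdrop
      exact absurd hdrop (by simp)
    have hcons := List.drop_eq_getElem_cons hkR
    rw [← hdrop] at hcons
    obtain ⟨hc0, hrest'⟩ : c = row[k] ∧ rest' = row.drop (k + 1) := by
      constructor <;> [exact (List.cons.injEq _ _ _ _ ▸ hcons).1;
        exact (List.cons.injEq _ _ _ _ ▸ hcons).2]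
    have hcur : ∀ fuel, k + 2 ≤ fuel →
        (prevC == some "#" || (prevC == some "." && prevV)) =
          occInSight [row] (-1) 0 fuel ↑k 0 := by
      intro fuel hf
      obtain ⟨f, rfl⟩ : ∃ f, fuel = f + 1 := ⟨fuel - 1, by omega⟩
      rw [occ_unfold]
      have hz : PySem.List.pyGet? [row] ((0 : Int) + 0) = some row := by
        simp [PySem.List.pyGet?, PySem.List.pyIdx?]
      match k, h0, hS with
      | 0, h0, _ =>
        rw [h0 rfl, if_pos (Or.inr (show ((0 : Nat) : Int) + (-1) < 0 from by norm_num))]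
        rfl
      | k' + 1, _, hS =>
        obtain ⟨hk'R, hprevC, hprop⟩ := hS k' rfl
        rw [if_neg (by omega), hz]
        simp only [Option.bind_some]
        have e1 : (↑(k' + 1) : Int) + (-1) = ↑k' := by omega
        rw [e1, PySem.List.pyGet?_natCast, List.getElem?_eq_getElem hk'R]
        simp only [Option.elim]
        rw [hprevC, show row.getD k' "" = row[k'] from List.getD_eq_getElem row "" hk'R]
        by_cases h1 : row[k'] = "#"
        · simp [h1]
        · by_cases h2 : row[k'] = "."
          · have hv : (some row[k'] == some "#" || (some row[k'] == some "." && prevV)) =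
                prevV := by simp [h1, h2]
            rw [hv, if_neg h1, if_pos h2, show (0 : Int) + 0 = 0 from by ring]
            exact hprop f (by omega)
          · simp [h1, h2]
    simp only [scanRowAux]
    match j, hj with
    | 0, _ =>
      simp only [List.getD_cons_zero]
      exact hcur fuel (by omega)
    | j' + 1, hj =>
      simp only [List.getD_cons_succ, List.length_cons] at hj ⊢
      have := scanRow_correct row rest' (k + 1) (some c)
        (prevC == some "#" || (prevC == some "." && prevV))
        hrest' (by omega)
        (by
          intro k'' hk''
          have hkk : k'' = k := by omega
          subst hkk
          refine ⟨hkR, by rw [hc0, List.getD_eq_getElem row "" hkR], ?_⟩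
          intro fuel hf
          exact hcur fuel hf)
        j' fuel (by omega) (by omega)
      rw [this]
      congr 2
      omega

theorem rowlen_le_fold (config : List (List String)) (y : Nat) (hy : y < config.length) :
    (config.getD y []).length ≤ config.foldl (fun acc row => max acc row.length) 0 := by
  rw [List.getD_eq_getElem config [] hy]
  exact (PySem.List.le_foldl_max_nat config List.length 0).2 _ (List.getElem_mem hy)

theorem sweep_entry_up (config : List (List String)) (dx : Int) (y x : Nat)
    (hy : y < config.length) (hx : x < (config.getD y []).length) :
    ((sweepVAux dx none [] config).getD y []).getD x false =
      occInSight config dx (-1) (pvFuel config) ↑x ↑y := by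
  have := sweepV_correct config dx config 0 none [] (by simp) (fun _ => rfl)
    (fun k' hk => absurd hk (by omega)) y x (pvFuel config) hy hx (by unfold pvFuel; omega)
  simpa using this

theorem sweep_entry_down (config : List (List String)) (dx : Int) (y x : Nat)
    (hy : y < config.length) (hx : x < (config.getD y []).length) :
    ((sweepVAux dx none [] config.reverse).reverse.getD y []).getD x false =
      occInSight config dx 1 (pvFuel config) ↑x ↑y := by
  have hlen : (sweepVAux dx none [] config.reverse).length = config.length := by
    rw [length_sweepVAux, List.length_reverse]
  rw [getD_reverse _ y [] (by rw [hlen]; exact hy), hlen]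
  have hrev : config.reverse.getD (config.length - 1 - y) [] = config.getD y [] := by
    rw [getD_reverse config _ [] (by omega), show config.length - 1 -
      (config.length - 1 - y) = y from by omega]
  have := sweepV_correct config.reverse dx config.reverse 0 none [] (by simp) (fun _ => rfl)
    (fun k' hk => absurd hk (by omega)) (config.length - 1 - y) x (pvFuel config)
    (by rw [List.length_reverse]; omega) (by rw [hrev]; exact hx)
    (by unfold pvFuel; omega)
  simp only [Nat.zero_add] at this
  rw [this, ← occ_vert_rev config dx (pvFuel config) y hy ↑x]

theorem sweep_entry_left (config : List (List String)) (y x : Nat)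
    (hy : y < config.length) (hx : x < (config.getD y []).length) :
    ((config.map (fun row => scanRowAux none false row)).getD y []).getD x false =
      occInSight config (-1) 0 (pvFuel config) ↑x ↑y := by
  have hmap : (config.map (fun row => scanRowAux none false row)).getD y [] =
      scanRowAux none false (config.getD y []) := by
    simp [List.getD_eq_getElem?_getD, List.getElem?_map, List.getElem?_eq_getElem hy,
      List.getD_eq_getElem config [] hy]
  rw [hmap]
  have := scanRow_correct (config.getD y []) (config.getD y []) 0 none false (by simp)
    (fun _ => rfl) (fun k' hk => absurd hk (by omega)) x (pvFuel config) hx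
    (by have := rowlen_le_fold config y hy; unfold pvFuel; omega)
  simp only [Nat.zero_add] at this
  rw [this, occ_row_local config (-1) y hy]

theorem sweep_entry_right (config : List (List String)) (y x : Nat)
    (hy : y < config.length) (hx : x < (config.getD y []).length) :
    ((config.map (fun row => (scanRowAux none false row.reverse).reverse)).getD y []).getD
        x false =
      occInSight config 1 0 (pvFuel config) ↑x ↑y := by
  have hmap : (config.map (fun row => (scanRowAux none false row.reverse).reverse)).getD y [] =
      (scanRowAux none false (config.getD y []).reverse).reverse := by
    simp [List.getD_eq_getElem?_getD, List.getElem?_map, List.getElem?_eq_getElem hy,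
      List.getD_eq_getElem config [] hy]
  rw [hmap]
  have hsl : (scanRowAux none false (config.getD y []).reverse).length =
      (config.getD y []).length := by
    rw [length_scanRowAux, List.length_reverse]
  rw [getD_reverse _ x false (by rw [hsl]; exact hx), hsl]
  have := scanRow_correct (config.getD y []).reverse (config.getD y []).reverse 0 none false
    (by simp) (fun _ => rfl) (fun k' hk => absurd hk (by omega))
    ((config.getD y []).length - 1 - x) (pvFuel config)
    (by rw [List.length_reverse]; omega)
    (by have := rowlen_le_fold config y hy; unfold pvFuel; omega)
  simp only [Nat.zero_add] at this
  rw [this, ← occ_row_rev (config.getD y []) (pvFuel config) x hx,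
    occ_row_local config 1 y hy]

theorem addIf (s : Nat) (b : Bool) : (s + if b then 1 else 0) = if b then s + 1 else s := by
  cases b <;> simp

theorem countAt_eq (config : List (List String)) (y x : Nat) (hy : y < config.length)
    (hx : x < (config.getD y []).length) :
    countAt (pvDeltas.map (fun d => sweep config d.1 d.2)) y x = adjCount config ↑x ↑y := by
  have hup : ∀ dx : Int, sweep config dx (-1) = sweepVAux dx none [] config := by
    intro dx; norm_num [sweep]
  have hdown : ∀ dx : Int, sweep config dx 1 =
      (sweepVAux dx none [] config.reverse).reverse := by
    intro dx; norm_num [sweep]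
  have hleft : sweep config (-1) 0 = config.map (fun row => scanRowAux none false row) := by
    norm_num [sweep]
  have hright : sweep config 1 0 =
      config.map (fun row => (scanRowAux none false row.reverse).reverse) := by
    norm_num [sweep]
  simp only [pvDeltas, List.map_cons, List.map_nil, countAt, adjCount,
    List.foldl_cons, List.foldl_nil]
  rw [hup (-1), hup 0, hup 1, hdown (-1), hdown 0, hdown 1, hleft, hright]
  rw [sweep_entry_up config (-1) y x hy hx, sweep_entry_up config 0 y x hy hx,
    sweep_entry_up config 1 y x hy hx, sweep_entry_down config (-1) y x hy hx,
    sweep_entry_down config 0 y x hy hx, sweep_entry_down config 1 y x hy hx,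
    sweep_entry_left config y x hy hx, sweep_entry_right config y x hy hx]
  simp only [addIf]

theorem b_eq_spec (config : List (List String)) : apply_new_rules_alt config = specGrid config := by
  simp only [apply_new_rules_alt, specGrid]
  apply List.ext_getElem (by simp)
  intro y hy1 hy2
  simp only [List.getElem_mapIdx]
  apply List.ext_getElem (by simp)
  intro x hx1 hx2
  simp only [List.getElem_mapIdx]
  have hy : y < config.length := by simpa using hy2
  have hx : x < (config.getD y []).length := by
    rw [List.getD_eq_getElem config [] hy]
    simpa using hx1
  simp only [newCell, countAt_eq config y x hy hx, ruleCell]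
  split_ifs <;> simp_all

-- ===== VERDICT (by name: the statement is the Claim_ definition above) =====
theorem apply_new_rules_spec : Claim_equal_apply_new_rules := by
  intro config _
  unfold Spec_apply_new_rules
  rw [a_eq_spec, b_eq_spec]
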